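-- pv_equiv track=rewrite | github.com/xchdtk/Algorism | 2021.08.10/상호평가.py | solution
-- ===== SOURCE A (Python) =====
-- def solution(scores):
--     max_score = []
--     min_score = []
--     result    = []
--     same      = []
--     n = len(scores)
--     for i in range(n):
--         for j in range(n):
--             if i == j:
--                 same.append(scores[i][j])
--             if len(max_score) == j:
--                 max_score.append(scores[i][j])
--
--             if len(min_score) == j:
--                 min_score.append(scores[i][j])
--
--             if len(result) == j:
--                 result.append([scores[i][j]])
--                 continue
--
--             if max_score[j] < scores[i][j]:
--                 max_score[j] = scores[i][j]
--
--             if min_score[j] > scores[i][j]: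
--                 min_score[j] = scores[i][j]
--             result[j].append(scores[i][j])
--
--     return max_score, min_score, result
-- ===== SOURCE B (Python) =====
-- def solution(scores):
--     n = len(scores)
--     result = [[scores[i][j] for i in range(n)] for j in range(n)]
--     max_score = [max(col) for col in result]
--     min_score = [min(col) for col in result]
--     return max_score, min_score, result
-- ===== Notes on version B (the rewrite author's own statement) =====
-- stated objective: simpler
-- what changed: Instead of one interleaved nested loop that uses list-length checks to lazily initialise the max/min/transpose accumulators (and builds an unused 'same' diagonal list), B builds the transpose first with two comprehensions and then reduces each column with max()/min().
import Mathlib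
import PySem

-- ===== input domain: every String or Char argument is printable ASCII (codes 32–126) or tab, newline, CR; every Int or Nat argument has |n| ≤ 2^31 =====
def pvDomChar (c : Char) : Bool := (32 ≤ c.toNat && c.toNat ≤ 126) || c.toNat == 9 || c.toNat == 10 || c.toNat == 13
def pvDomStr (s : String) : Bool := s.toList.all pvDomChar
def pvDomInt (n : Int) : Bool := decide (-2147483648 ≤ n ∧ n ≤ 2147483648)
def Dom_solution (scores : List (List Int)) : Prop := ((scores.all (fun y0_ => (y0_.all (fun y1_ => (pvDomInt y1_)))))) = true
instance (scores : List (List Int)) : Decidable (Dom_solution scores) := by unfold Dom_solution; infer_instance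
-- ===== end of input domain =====

-- B replaces A's interleaved nested loop (lazy length-check initialisation, unused 'same' list)
-- by building the transpose first and then reducing each column with max/min: a simpler decomposition.


-- ===== PORT A =====
-- Literal transliteration of A. Loop indices i, j come from range(n) with n = len(scores), hence
-- are nonnegative, so Python's scores[i][j] is plain List.getD (a row shorter than n, where Python
-- raises IndexError, is excluded by Pre_solution below). pvStepA is the body of A's inner loop,
-- with state (max_score, min_score, result, same); 'same' is built but unused, exactly as in A.
def pvStepA (scores : List (List Int)) (i : Nat)
    (st : List Int × List Int × List (List Int) × List Int) (j : Nat) :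
    List Int × List Int × List (List Int) × List Int :=
  let x := (scores.getD i []).getD j 0
  let same := if i = j then st.2.2.2 ++ [x] else st.2.2.2
  let maxs := if st.1.length = j then st.1 ++ [x] else st.1
  let mins := if st.2.1.length = j then st.2.1 ++ [x] else st.2.1
  if st.2.2.1.length = j then
    (maxs, mins, st.2.2.1 ++ [[x]], same)
  else
    let maxs' := if maxs.getD j 0 < x then maxs.set j x else maxs
    let mins' := if mins.getD j 0 > x then mins.set j x else mins
    (maxs', mins', st.2.2.1.set j ((st.2.2.1.getD j []) ++ [x]), same)

def solution (scores : List (List Int)) : List Int × List Int × List (List Int) :=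
  let n := scores.length
  let st := (List.range n).foldl
    (fun st i => (List.range n).foldl (pvStepA scores i) st)
    (([], [], [], []) : List Int × List Int × List (List Int) × List Int)
  (st.1, st.2.1, st.2.2.1)

-- ===== PORT B =====
-- Literal transliteration of Source B: build the transpose, then reduce each column with max()/min().
def solution_alt (scores : List (List Int)) : List Int × List Int × List (List Int) :=
  let n := scores.length
  let result := (List.range n).map (fun j => (List.range n).map (fun i => (scores.getD i []).getD j 0))
  let max_score := result.map (fun col => (PySem.List.max? col (fun x => x)).getD 0)
  let min_score := result.map (fun col => (PySem.List.min? col (fun x => x)).getD 0)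
  (max_score, min_score, result)

-- ===== PRECONDITION & SPEC =====
-- Pre_ excludes exactly the ragged inputs having a row shorter than len(scores), on which
-- the Python A (and B) raises IndexError at scores[i][j].
def Pre_solution (scores : List (List Int)) : Prop :=
  ∀ row ∈ scores, scores.length ≤ row.length
instance (scores : List (List Int)) : Decidable (Pre_solution scores) := by unfold Pre_solution; infer_instance

def pvWitness_solution : List (List Int) := [[1, 2], [3, 0]]

def Spec_solution (scores : List (List Int)) (out : List Int × List Int × List (List Int)) : Prop := out = solution_alt scores
instance (scores : List (List Int)) (out : List Int × List Int × List (List Int)) : Decidable (Spec_solution scores out) := by unfold Spec_solution; infer_instance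

-- ===== CLAIM (what is proved, stated in full; the proofs are below) =====
def Claim_equal_solution : Prop := ∀ (scores : List (List Int)), Dom_solution scores → Pre_solution scores → Spec_solution scores (solution scores)

-- ===== LEMMAS AND PROOFS =====

-- the matrix entry both programs read, made total via getD
def pvG (scores : List (List Int)) (i j : Nat) : Int := (scores.getD i []).getD j 0

-- column j restricted to the first i rows
def pvColP (scores : List (List Int)) (i j : Nat) : List Int :=
  (List.range i).map (fun i' => pvG scores i' j)

-- Python's running max / min of a list (0 is a dummy for [])
def pvRunMax : List Int → Int
  | [] => 0
  | a :: t => t.foldl max a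
def pvRunMin : List Int → Int
  | [] => 0
  | a :: t => t.foldl min a

-- A's loop state during row i (i ≥ 1), after the inner loop has processed columns 0..j-1
def pvMid (scores : List (List Int)) (n i j : Nat) :
    List Int × List Int × List (List Int) × List Int :=
  ((List.range n).map (fun k => if k < j then max (pvRunMax (pvColP scores i k)) (pvG scores i k) else pvRunMax (pvColP scores i k)),
   (List.range n).map (fun k => if k < j then min (pvRunMin (pvColP scores i k)) (pvG scores i k) else pvRunMin (pvColP scores i k)),
   (List.range n).map (fun k => if k < j then pvColP scores i k ++ [pvG scores i k] else pvColP scores i k),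
   (List.range i).map (fun k => pvG scores k k) ++ (if i < j then [pvG scores i i] else []))

lemma pvRunMax_append (l : List Int) (x : Int) (hl : l ≠ []) :
    pvRunMax (l ++ [x]) = max (pvRunMax l) x := by
  cases l with
  | nil => simp at hl
  | cons a t => simp [pvRunMax, List.foldl_append]

lemma pvRunMin_append (l : List Int) (x : Int) (hl : l ≠ []) :
    pvRunMin (l ++ [x]) = min (pvRunMin l) x := by
  cases l with
  | nil => simp at hl
  | cons a t => simp [pvRunMin, List.foldl_append]

lemma pvColP_succ (scores : List (List Int)) (i j : Nat) :
    pvColP scores (i + 1) j = pvColP scores i j ++ [pvG scores i j] := by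
  simp [pvColP, List.range_succ]

lemma pvColP_ne_nil (scores : List (List Int)) {i : Nat} (j : Nat) (hi : 1 ≤ i) :
    pvColP scores i j ≠ [] := by
  simp only [pvColP, ne_eq, List.map_eq_nil_iff, List.range_eq_nil]
  omega

lemma pv_set_map_range {α : Type} (f : Nat → α) (n j : Nat) (v : α) :
    ((List.range n).map f).set j v = (List.range n).map (fun k => if k = j then v else f k) := by
  apply List.ext_getElem
  · simp
  · intro k h1 h2
    simp only [List.getElem_set, List.getElem_map, List.getElem_range]
    by_cases h : j = k
    · subst h; simp
    · rw [if_neg h, if_neg (Ne.symm h)]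

lemma pv_map_lt_succ {α : Type} (f u : Nat → α) (n j : Nat) (hj : j < n) :
    ((List.range n).map (fun k => if k < j then u k else f k)).set j (u j)
      = (List.range n).map (fun k => if k < j + 1 then u k else f k) := by
  rw [pv_set_map_range _ n j _]
  apply List.map_congr_left
  intro k _
  by_cases h : k = j
  · subst h; simp
  · by_cases h2 : k < j <;> simp [h, h2] <;> omega

lemma pv_map_lt_succ_eq {α : Type} (f u : Nat → α) (n j : Nat) (h : u j = f j) :
    ((List.range n).map (fun k => if k < j then u k else f k))
      = (List.range n).map (fun k => if k < j + 1 then u k else f k) := by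
  apply List.map_congr_left
  intro k _
  by_cases hk : k = j
  · subst hk; simp [h]
  · by_cases h2 : k < j <;> simp [h2] <;> omega

-- row 0 from the empty state: every length test fires, everything is appended
lemma pv_row0 (scores : List (List Int)) (j : Nat) :
    (List.range j).foldl (pvStepA scores 0) ([], [], [], []) =
      ((List.range j).map (fun k => pvG scores 0 k),
       (List.range j).map (fun k => pvG scores 0 k),
       (List.range j).map (fun k => [pvG scores 0 k]),
       if j = 0 then [] else [pvG scores 0 0]) := by
  induction j with
  | zero => simp
  | succ j ih =>
    rw [List.range_succ, List.foldl_append, ih]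
    by_cases hj : j = 0
    · subst hj; simp [pvStepA, pvG]
    · simp [pvStepA, pvG, hj]
      omega

-- one inner step of row i (i ≥ 1): the length tests are all false, index j is updated in place
lemma pv_innerstep (scores : List (List Int)) (n i j : Nat) (hi : 1 ≤ i) (hj : j < n) :
    pvStepA scores i (pvMid scores n i j) j = pvMid scores n i (j + 1) := by
  have hne : n ≠ j := by omega
  have hcol := pvColP_ne_nil scores j hi
  have hxg : (scores.getD i []).getD j 0 = pvG scores i j := rfl
  simp only [pvStepA, pvMid, List.length_map, List.length_range, hne, if_false,
    PySem.List.getD_map_range _ n j _ hj, lt_irrefl, hxg]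
  refine Prod.ext ?_ (Prod.ext ?_ (Prod.ext ?_ ?_)) <;> simp only
  · by_cases hlt : pvRunMax (pvColP scores i j) < pvG scores i j
    · rw [if_pos hlt]
      have : pvG scores i j = max (pvRunMax (pvColP scores i j)) (pvG scores i j) := by
        omega
      rw [this, pv_map_lt_succ (fun k => pvRunMax (pvColP scores i k))
        (fun k => max (pvRunMax (pvColP scores i k)) (pvG scores i k)) n j hj]
    · rw [if_neg hlt]
      exact pv_map_lt_succ_eq _ _ n j (by omega)
  · by_cases hlt : pvRunMin (pvColP scores i j) > pvG scores i j
    · rw [if_pos hlt]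
      have : pvG scores i j = min (pvRunMin (pvColP scores i j)) (pvG scores i j) := by
        omega
      rw [this, pv_map_lt_succ (fun k => pvRunMin (pvColP scores i k))
        (fun k => min (pvRunMin (pvColP scores i k)) (pvG scores i k)) n j hj]
    · rw [if_neg hlt]
      exact pv_map_lt_succ_eq _ _ n j (by omega)
  · exact pv_map_lt_succ (fun k => pvColP scores i k)
      (fun k => pvColP scores i k ++ [pvG scores i k]) n j hj
  · by_cases hij : i = j
    · subst hij
      simp
    · have h1 : (i < j) = (i < j + 1) := by
        by_cases h : i < j <;> simp [h] <;> omega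
    
      simp [hij, h1]

-- the whole inner loop of row i (i ≥ 1)
lemma pv_inner (scores : List (List Int)) (n i : Nat) (hi : 1 ≤ i) :
    ∀ j, j ≤ n → (List.range j).foldl (pvStepA scores i) (pvMid scores n i 0) = pvMid scores n i j := by
  intro j
  induction j with
  | zero => intro _; simp
  | succ j ih =>
    intro hj
    rw [List.range_succ, List.foldl_append, ih (by omega)]
    simpa using pv_innerstep scores n i j hi (by omega)

-- end of row i rewrites to start of row i+1
lemma pv_mid_shift (scores : List (List Int)) (n i : Nat) (hi : 1 ≤ i) (hin : i < n) :
    pvMid scores n i n = pvMid scores n (i + 1) 0 := by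
  have hcol : ∀ k, pvColP scores i k ≠ [] := fun k => pvColP_ne_nil scores k hi
  simp only [pvMid, Nat.not_lt_zero, if_false, hin, if_pos]
  refine Prod.ext ?_ (Prod.ext ?_ (Prod.ext ?_ ?_)) <;> simp only
  · apply List.map_congr_left; intro k hk
    rw [List.mem_range] at hk
    rw [if_pos hk, pvColP_succ, pvRunMax_append _ _ (hcol k)]
  · apply List.map_congr_left; intro k hk
    rw [List.mem_range] at hk
    rw [if_pos hk, pvColP_succ, pvRunMin_append _ _ (hcol k)]
  · apply List.map_congr_left; intro k hk
    rw [List.mem_range] at hk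
    rw [if_pos hk, pvColP_succ]
  · rw [List.range_succ]
    simp

-- the outer loop up to row i (1 ≤ i ≤ n)
lemma pv_outer (scores : List (List Int)) (n : Nat) (hn : n = scores.length) :
    ∀ i, 1 ≤ i → i ≤ n →
      (List.range i).foldl (fun st i' => (List.range n).foldl (pvStepA scores i') st) ([], [], [], [])
        = pvMid scores n i 0 := by
  intro i
  induction i with
  | zero => omega
  | succ i ih =>
    intro _ hin
    by_cases hi : i = 0
    · subst hi
      have hr1 : List.range (0 + 1) = [0] := rfl
      rw [hr1]
      simp only [List.foldl_cons, List.foldl_nil]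
      rw [pv_row0 scores n]
      have hn1 : n ≠ 0 := by omega
      simp [pvMid, pvColP, pvRunMax, pvRunMin, hr1, hn1]
    · rw [List.range_succ, List.foldl_append, ih (by omega) (by omega)]
      simp only [List.foldl_cons, List.foldl_nil]
      rw [pv_inner scores n i (by omega) n (by omega), pv_mid_shift scores n i (by omega) (by omega)]

-- columns are nonempty (n ≥ 1), so Python's max/min agree with the running fold
lemma pv_reduce_max (l : List Int) (hl : l ≠ []) :
    (PySem.List.max? l (fun x => x)).getD 0 = pvRunMax l := by
  cases l with
  | nil => simp at hl
  | cons a t => rw [PySem.List.max?_id_cons]; simp [pvRunMax]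

lemma pv_reduce_min (l : List Int) (hl : l ≠ []) :
    (PySem.List.min? l (fun x => x)).getD 0 = pvRunMin l := by
  cases l with
  | nil => simp at hl
  | cons a t => rw [PySem.List.min?_id_cons]; simp [pvRunMin]

-- ===== VERDICT (by name: the statement is the Claim_ definition above) =====
theorem solution_spec : Claim_equal_solution := by
  intro scores _ _
  show solution scores = solution_alt scores
  simp only [solution, solution_alt]
  by_cases hn : scores.length = 0
  · simp [hn]
  · have h1 : 1 ≤ scores.length := by omega
    rw [pv_outer scores scores.length rfl scores.length h1 le_rfl]
    have hres : ∀ j : Nat,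
        (List.range scores.length).map (fun i => (scores.getD i []).getD j 0)
          = pvColP scores scores.length j := by
      intro j; rfl
    simp only [pvMid, Nat.not_lt_zero, if_false]
    refine Prod.ext ?_ (Prod.ext ?_ ?_) <;> simp only
    · rw [List.map_map]
      apply List.map_congr_left; intro k _
      simp only [Function.comp, hres]
      exact (pv_reduce_max _ (pvColP_ne_nil scores k h1)).symm
    · rw [List.map_map]
      apply List.map_congr_left; intro k _
      simp only [Function.comp, hres]
      exact (pv_reduce_min _ (pvColP_ne_nil scores k h1)).symm
    · apply List.map_congr_left; intro k _
      rw [hres]
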